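-- pv_equiv track=rewrite | github.com/Gudi00/try_all_github | labs/G.py | max_fishka_power
-- ===== SOURCE A (Python) =====
-- from itertools import permutations
-- from collections import Counter
--
-- def max_fishka_power(n, m, k, queue):
--     max_power = 0
--
--     # Перебираем возможные размещения фишек на поле
--     for placement in permutations(queue, min(n, m)):
--         field = list(placement)
--         levels = Counter((t, 1) for t in field)  # Начальные уровни фишек
--         remaining_moves = k
--
--         # Выполняем слияния, пока есть ходы
--         while remaining_moves > 0:
--             merged = False
--             for (t, l), count in sorted(levels.items(), reverse=True):
--                 if count > 1:  # Если есть возможность объединить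
--                     merges = count // 2
--                     levels[(t, l)] -= merges * 2
--                     levels[(t, l + 1)] += merges
--                     remaining_moves -= merges
--                     merged = True
--                     if remaining_moves <= 0:
--                         break
--             if not merged:
--                 break  # Если не удалось совершить ни одно объединение, останавливаемся
--
--         # Вычисляем силу
--         total_power = sum(t * l * count for (t, l), count in levels.items())
--         max_power = max(max_power, total_power)
--
--     return max_power
-- ===== SOURCE B (Python) =====
-- from itertools import combinations
--
--
-- def _merge_power(tiles, k):
--     # levels holds only positive counts: {(value, level): count}
--     levels = {}
--     for t in tiles:
--         levels[(t, 1)] = levels.get((t, 1), 0) + 1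
--     remaining = k
--     while remaining > 0:
--         total = sum(c // 2 for c in levels.values())
--         if total == 0:
--             break
--         if total < remaining:
--             # a full round of merges: every pair at (t, l) becomes one tile at
--             # (t, l+1); no per-item move bookkeeping and no sorting is needed,
--             # because the whole round fits in the remaining moves
--             new = {}
--             for (t, l), c in levels.items():
--                 if c // 2:
--                     new[(t, l + 1)] = new.get((t, l + 1), 0) + c // 2
--                 if c % 2:
--                     new[(t, l)] = new.get((t, l), 0) + c % 2
--             levels = new
--             remaining -= total
--         else:
--             # last round: moves run out mid-round, so merge groups in
--             # descending key order until they do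
--             for (t, l), c in sorted(levels.items(), reverse=True):
--                 m = c // 2
--                 if m:
--                     levels[(t, l)] = c - 2 * m
--                     levels[(t, l + 1)] = levels.get((t, l + 1), 0) + m
--                     remaining -= m
--                     if remaining <= 0:
--                         break
--             break
--     return sum(t * l * c for (t, l), c in levels.items())
--
--
-- def max_fishka_power(n, m, k, queue):
--     # The merge result depends only on the multiset of placed tiles, so one
--     # sorted combination per distinct multiset replaces all its permutations.
--     best = 0
--     for comb in {tuple(sorted(c)) for c in combinations(queue, min(n, m))}:
--         best = max(best, _merge_power(comb, k))
--     return best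
-- ===== Notes on version B (the rewrite author's own statement) =====
-- stated objective: alternative
-- what changed: A simulates the merge loop for every r-permutation of the queue with per-item move bookkeeping each round; B enumerates one sorted combination per distinct multiset (the result only depends on the multiset) and rebuilds whole merge rounds in closed form (count%2 stays, count//2 carries to the next level), keeping an item-by-item sorted scan only for the final move-limited round.
import Mathlib
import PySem

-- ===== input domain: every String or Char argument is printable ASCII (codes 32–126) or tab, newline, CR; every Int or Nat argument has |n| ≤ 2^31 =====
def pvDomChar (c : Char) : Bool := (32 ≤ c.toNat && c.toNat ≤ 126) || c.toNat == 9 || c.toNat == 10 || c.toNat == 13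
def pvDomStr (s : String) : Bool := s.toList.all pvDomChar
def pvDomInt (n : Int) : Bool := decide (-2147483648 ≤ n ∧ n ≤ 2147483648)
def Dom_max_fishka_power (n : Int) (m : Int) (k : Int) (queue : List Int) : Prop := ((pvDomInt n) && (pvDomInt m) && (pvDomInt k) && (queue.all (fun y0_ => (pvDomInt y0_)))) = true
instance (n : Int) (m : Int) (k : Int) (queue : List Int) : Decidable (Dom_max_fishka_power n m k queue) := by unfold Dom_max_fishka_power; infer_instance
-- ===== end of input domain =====

-- B enumerates one sorted combination per distinct multiset instead of every permutation,
-- and replaces A's per-item merge bookkeeping by whole rounds rebuilt in closed form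
-- (a sorted item loop remains only for the final, move-limited round).

-- ===== PORT A =====
-- Python sorts the items ((t,l),count) as nested tuples, lexicographically; the keys
-- (t,l) of a dict are unique, so ordering by the key pair alone (lexicographic via
-- Prod.Lex) produces exactly Python's sorted order — counts are never compared.
-- (shared by both ports: both Pythons call sorted(levels.items(), reverse=True))
def pvKey (p : (Int × Int) × Int) : Int ×ₗ Int := toLex p.1

-- one 'for (t, l), count in sorted(levels.items(), reverse=True): …' pass of A;
-- Counter's `c[k] -= x` / `c[k] += x` is `modify k 0 (· - x)` / `modify k 0 (· + x)`.
def pvPass : List ((Int × Int) × Int) → PySem.Dict (Int × Int) Int → Int → Bool →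
    PySem.Dict (Int × Int) Int × Int × Bool
  | [], d, rem, merged => (d, rem, merged)
  | ((t, l), count) :: rest, d, rem, merged =>
    if 1 < count then
      let merges := PySem.Int.floordiv count 2
      let d' := (d.modify (t, l) 0 (fun v => v - merges * 2)).modify (t, l + 1) 0 (fun v => v + merges)
      let rem' := rem - merges
      if rem' ≤ 0 then (d', rem', true) else pvPass rest d' rem' true
    else pvPass rest d rem merged

-- 'while remaining_moves > 0: …' with fuel k.toNat + 1: every pass that merged consumed
-- at least one move, so at most k merging passes occur and the fuel is never exhausted
-- while the Python loop would still run.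
def pvLoop : Nat → PySem.Dict (Int × Int) Int → Int → PySem.Dict (Int × Int) Int
  | 0, d, _ => d
  | fuel + 1, d, rem =>
    if 0 < rem then
      let res := pvPass (PySem.List.sorted d.items pvKey true) d rem false
      if res.2.2 then pvLoop fuel res.1 res.2.1 else res.1
    else d

-- levels = Counter((t, 1) for t in field); run the while loop; sum t * l * count.
def pvSim (k : Int) (field : List Int) : Int :=
  ((pvLoop (k.toNat + 1) (PySem.Dict.counter (field.map (fun t => (t, (1 : Int))))) k).items.map
    (fun p => p.1.1 * p.1.2 * p.2)).sum

def max_fishka_power (n : Int) (m : Int) (k : Int) (queue : List Int) : Int :=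
  (PySem.List.permutations queue (min n m).toNat).foldl
    (fun acc p => max acc (pvSim k p)) 0

-- ===== PORT B =====
-- the body of B's full-round rebuild: for (t,l),c in levels.items():
--   if c//2: new[(t,l+1)] = new.get((t,l+1),0) + c//2
--   if c%2:  new[(t,l)]   = new.get((t,l),0)   + c%2
def pvUpdB (new : PySem.Dict (Int × Int) Int) (p : (Int × Int) × Int) :
    PySem.Dict (Int × Int) Int :=
  let m2 := PySem.Int.floordiv p.2 2
  let new1 := if m2 ≠ 0 then new.insert (p.1.1, p.1.2 + 1) (new.getD (p.1.1, p.1.2 + 1) 0 + m2) else new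
  if PySem.Int.mod p.2 2 ≠ 0 then new1.insert p.1 (new1.getD p.1 0 + PySem.Int.mod p.2 2) else new1

def pvFullPass (items : List ((Int × Int) × Int)) : PySem.Dict (Int × Int) Int :=
  items.foldl pvUpdB PySem.Dict.empty

-- B's final round: 'for (t, l), c in sorted(levels.items(), reverse=True): …' with break
def pvPassPart : List ((Int × Int) × Int) → PySem.Dict (Int × Int) Int → Int →
    PySem.Dict (Int × Int) Int
  | [], e, _ => e
  | ((t, l), c) :: rest, e, rem =>
    let m2 := PySem.Int.floordiv c 2
    if m2 ≠ 0 then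
      let e1 := e.insert (t, l) (c - 2 * m2)
      let e2 := e1.insert (t, l + 1) (e1.getD (t, l + 1) 0 + m2)
      if rem - m2 ≤ 0 then e2 else pvPassPart rest e2 (rem - m2)
    else pvPassPart rest e rem

-- B's while loop, same fuel argument as A's: every continuing round consumes ≥ 1 move.
def pvLoopB : Nat → PySem.Dict (Int × Int) Int → Int → PySem.Dict (Int × Int) Int
  | 0, e, _ => e
  | fuel + 1, e, rem =>
    if 0 < rem then
      let total := (e.values.map (fun c => PySem.Int.floordiv c 2)).sum
      if total = 0 then e
      else if total < rem then pvLoopB fuel (pvFullPass e.items) (rem - total)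
      else pvPassPart (PySem.List.sorted e.items pvKey true) e rem
    else e

-- levels = {}; for t in tiles: levels[(t,1)] = levels.get((t,1),0)+1; loop; sum.
def pvSimB (k : Int) (tiles : List Int) : Int :=
  let init := tiles.foldl (fun d t => d.insert (t, (1 : Int)) (d.getD (t, 1) 0 + 1)) PySem.Dict.empty
  ((pvLoopB (k.toNat + 1) init k).items.map (fun p => p.1.1 * p.1.2 * p.2)).sum

-- {tuple(sorted(c)) for c in combinations(queue, min(n, m))}, then the best power over
-- that set (a max over a Python set does not depend on its iteration order).
def max_fishka_power_alt (n : Int) (m : Int) (k : Int) (queue : List Int) : Int :=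
  (PySem.Set.ofList ((PySem.List.combinations queue (min n m).toNat).map
      (fun c => PySem.List.sorted c (fun x => x) false))).foldl
    (fun acc c => max acc (pvSimB k c)) 0

-- ===== PRECONDITION & SPEC =====
-- Pre_ excludes exactly the inputs where Python raises: min(n, m) < 0 makes
-- itertools.permutations (in A) and itertools.combinations (in B) raise ValueError.
def Pre_max_fishka_power (n : Int) (m : Int) (k : Int) (queue : List Int) : Prop :=
  0 ≤ min n m
instance (n : Int) (m : Int) (k : Int) (queue : List Int) : Decidable (Pre_max_fishka_power n m k queue) := by unfold Pre_max_fishka_power; infer_instance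

def pvWitness_max_fishka_power : Int × Int × Int × List Int := (2, 2, 1, [1, 2])

def Spec_max_fishka_power (n : Int) (m : Int) (k : Int) (queue : List Int) (out : Int) : Prop := out = max_fishka_power_alt n m k queue
instance (n : Int) (m : Int) (k : Int) (queue : List Int) (out : Int) : Decidable (Spec_max_fishka_power n m k queue out) := by unfold Spec_max_fishka_power; infer_instance

-- ===== CLAIM (what is proved, stated in full; the proofs are below) =====
def Claim_equal_max_fishka_power : Prop := ∀ (n : Int) (m : Int) (k : Int) (queue : List Int), Dom_max_fishka_power n m k queue → Pre_max_fishka_power n m k queue → Spec_max_fishka_power n m k queue (max_fishka_power n m k queue)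

-- ===== LEMMAS AND PROOFS =====

-- "same Counter up to zero-count keys": unique keys on both sides, every lookup agrees
def pvEqv (d e : PySem.Dict (Int × Int) Int) : Prop :=
  d.keys.Nodup ∧ e.keys.Nodup ∧ ∀ key, d.getD key 0 = e.getD key 0

-- loop invariant: pvEqv plus A's counts are nonnegative and B stores only positive counts
def pvInv (d e : PySem.Dict (Int × Int) Int) : Prop :=
  pvEqv d e ∧ (∀ p ∈ d.items, 0 ≤ p.2) ∧ (∀ p ∈ e.items, 0 < p.2)

def pvMerges (p : (Int × Int) × Int) : Int :=
  if 1 < p.2 then PySem.Int.floordiv p.2 2 else 0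

-- the body of A's pass, applied when the pass does not run out of moves
def pvUpdA (d : PySem.Dict (Int × Int) Int) (p : (Int × Int) × Int) :
    PySem.Dict (Int × Int) Int :=
  if 1 < p.2 then
    (d.modify p.1 0 (fun v => v - PySem.Int.floordiv p.2 2 * 2)).modify
      (p.1.1, p.1.2 + 1) 0 (fun v => v + PySem.Int.floordiv p.2 2)
  else d

-- net change each pass body makes to the count at `key`
def pvContrA (key : Int × Int) (p : (Int × Int) × Int) : Int :=
  (if key = p.1 then -(2 * pvMerges p) else 0) + (if key = (p.1.1, p.1.2 + 1) then pvMerges p else 0)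

def pvContrB (key : Int × Int) (p : (Int × Int) × Int) : Int :=
  (if key = (p.1.1, p.1.2 + 1) then PySem.Int.floordiv p.2 2 else 0) +
    (if key = p.1 then PySem.Int.mod p.2 2 else 0)

theorem pvNodupModify (d : PySem.Dict (Int × Int) Int) (k : Int × Int) (d0 : Int)
    (f : Int → Int) (h : d.keys.Nodup) : (d.modify k d0 f).keys.Nodup := by
  rw [PySem.Dict.keys_modify]
  exact PySem.Dict.nodup_keys_insert _ _ _ h

theorem pvGetD_cases (d : PySem.Dict (Int × Int) Int) (hnd : d.keys.Nodup) (key : Int × Int) :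
    d.getD key 0 = 0 ∨ (key, d.getD key 0) ∈ d.items := by
  cases hc : d.contains key with
  | false => exact Or.inl (PySem.Dict.getD_of_not_contains d 0 hc)
  | true =>
      right
      have hk : key ∈ d.keys := (PySem.Dict.contains_iff_mem_keys d key).mp hc
      have : ∃ v, (key, v) ∈ d.items := by
        simp only [PySem.Dict.keys, List.mem_map] at hk
        obtain ⟨⟨k0, v⟩, hp, he⟩ := hk
        exact ⟨v, by simpa [← he] using hp⟩
      obtain ⟨v, hv⟩ := this
      rw [PySem.Dict.getD_of_mem_items d hv hnd 0]
      exact hv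

theorem pvGetD_nonneg {d : PySem.Dict (Int × Int) Int} (hnd : d.keys.Nodup)
    (hpos : ∀ p ∈ d.items, 0 < p.2) (key : Int × Int) : 0 ≤ d.getD key 0 := by
  rcases pvGetD_cases d hnd key with h | h
  · omega
  · exact le_of_lt (hpos _ h)

-- lookups of equal dicts transport membership of nonzero items
theorem pvMemItemsTrans {d e : PySem.Dict (Int × Int) Int} (hd : d.keys.Nodup)
    (he : e.keys.Nodup) (hg : ∀ key, d.getD key 0 = e.getD key 0)
    {p : (Int × Int) × Int} (hp : p ∈ d.items) (hne : p.2 ≠ 0) : p ∈ e.items := by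
  obtain ⟨k0, v⟩ := p
  have hdv : d.getD k0 0 = v := PySem.Dict.getD_of_mem_items d hp hd 0
  have hev : e.getD k0 0 = v := (hg k0).symm.trans hdv
  rcases pvGetD_cases e he k0 with h0 | h0
  · exact absurd (hev ▸ h0) hne
  · rwa [hev] at h0

theorem pvSumIte (l : List (Int × Int)) (hl : l.Nodup) (key : Int × Int) (c : Int × Int → Int) :
    (l.map (fun x => if key = x then c x else 0)).sum = if key ∈ l then c key else 0 := by
  induction l with
  | nil => simp
  | cons x t ih =>
      have hx : x ∉ t := (List.nodup_cons.mp hl).1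
      rw [List.map_cons, List.sum_cons, ih (List.nodup_cons.mp hl).2]
      by_cases hk : key = x
      · subst hk
        simp [hx]
      · simp [hk, List.mem_cons]

theorem pvSumDropZero {α : Type} (l : List α) (p : α → Bool) (h : α → Int)
    (hz : ∀ x ∈ l, p x = false → h x = 0) :
    (l.map h).sum = ((l.filter p).map h).sum := by
  induction l with
  | nil => simp
  | cons x t ih =>
      have ih' := ih (fun y hy => hz y (List.mem_cons_of_mem x hy))
      cases hp : p x with
      | true => simp [hp, ih']
      | false => simp [hp, ih', hz x List.mem_cons_self hp]

theorem pvSumZero (l : List Int) (h : ∀ x ∈ l, 0 ≤ x) (hs : l.sum = 0) : ∀ x ∈ l, x = 0 := by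
  induction l with
  | nil => simp
  | cons x t ih =>
      have hx : 0 ≤ x := h x List.mem_cons_self
      have ht : ∀ y ∈ t, 0 ≤ y := fun y hy => h y (List.mem_cons_of_mem x hy)
      have hts : 0 ≤ t.sum := List.sum_nonneg ht
      rw [List.sum_cons] at hs
      intro y hy
      rcases List.mem_cons.mp hy with rfl | hy
      · omega
      · exact ih ht (by omega) y hy

theorem pvSumKeysCongr (l1 l2 : List (Int × Int)) (h1 : l1.Nodup) (h2 : l2.Nodup)
    (h : Int × Int → Int) (hz1 : ∀ x ∈ l1, x ∉ l2 → h x = 0) (hz2 : ∀ x ∈ l2, x ∉ l1 → h x = 0) :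
    (l1.map h).sum = (l2.map h).sum := by
  have e1 : (l1.map h).sum = ((l1.filter (fun x => decide (x ∈ l2))).map h).sum :=
    pvSumDropZero l1 _ h (fun x hx hpx => hz1 x hx (by simpa using hpx))
  have e2 : (l2.map h).sum = ((l2.filter (fun x => decide (x ∈ l1))).map h).sum :=
    pvSumDropZero l2 _ h (fun x hx hpx => hz2 x hx (by simpa using hpx))
  have hperm : (l1.filter (fun x => decide (x ∈ l2))).Perm (l2.filter (fun x => decide (x ∈ l1))) := by
    refine (List.perm_ext_iff_of_nodup (h1.filter _) (h2.filter _)).mpr (fun a => ?_)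
    simp only [List.mem_filter, decide_eq_true_eq]
    exact ⟨fun ⟨u, w⟩ => ⟨w, u⟩, fun ⟨u, w⟩ => ⟨w, u⟩⟩
  rw [e1, e2, (hperm.map h).sum_eq]

theorem pvSumItemsCongr {d e : PySem.Dict (Int × Int) Int} (hd : d.keys.Nodup)
    (he : e.keys.Nodup) (hg : ∀ key, d.getD key 0 = e.getD key 0)
    (F : (Int × Int) → Int → Int) (hF : ∀ k, F k 0 = 0) :
    (d.items.map (fun p => F p.1 p.2)).sum = (e.items.map (fun p => F p.1 p.2)).sum := by
  rw [PySem.Dict.items_eq_map_keys d hd 0, PySem.Dict.items_eq_map_keys e he 0,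
    List.map_map, List.map_map]
  have hre : (e.keys.map ((fun p => F p.1 p.2) ∘ fun k => (k, e.getD k 0))) =
      (e.keys.map (fun k => F k (d.getD k 0))) :=
    List.map_congr_left (fun a _ => by simp [hg a])
  rw [hre]
  refine pvSumKeysCongr d.keys e.keys hd he (fun k => F k (d.getD k 0)) ?_ ?_
  · intro x _ hx2
    have hc : e.contains x = false := by
      cases hcc : e.contains x with
      | false => rfl
      | true => exact absurd ((PySem.Dict.contains_iff_mem_keys e x).mp hcc) hx2
    have : d.getD x 0 = 0 := (hg x).trans (PySem.Dict.getD_of_not_contains e 0 hc)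
    simp [this, hF]
  · intro x _ hx1
    have hc : d.contains x = false := by
      cases hcc : d.contains x with
      | false => rfl
      | true => exact absurd ((PySem.Dict.contains_iff_mem_keys d x).mp hcc) hx1
    have : d.getD x 0 = 0 := PySem.Dict.getD_of_not_contains d 0 hc
    simp [this, hF]

theorem pvGetDFoldl (upd : PySem.Dict (Int × Int) Int → ((Int × Int) × Int) → PySem.Dict (Int × Int) Int)
    (contr : ((Int × Int) × Int) → Int) (key : Int × Int)
    (step : ∀ d p, (upd d p).getD key 0 = d.getD key 0 + contr p) :
    ∀ (L : List ((Int × Int) × Int)) (d : PySem.Dict (Int × Int) Int),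
      (L.foldl upd d).getD key 0 = d.getD key 0 + (L.map contr).sum := by
  intro L
  induction L with
  | nil => simp
  | cons q t ih =>
      intro d
      rw [List.foldl_cons, ih, step, List.map_cons, List.sum_cons]
      ring

theorem pvGetD_updA (d : PySem.Dict (Int × Int) Int) (p : (Int × Int) × Int) (key : Int × Int) :
    (pvUpdA d p).getD key 0 = d.getD key 0 + pvContrA key p := by
  have hne : ((p.1.1, p.1.2 + 1) : Int × Int) ≠ p.1 := by
    intro h
    have := congrArg Prod.snd h
    simp at this
  unfold pvUpdA pvContrA pvMerges
  by_cases hc : 1 < p.2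
  · rw [if_pos hc]
    simp only [PySem.Dict.getD_modify, if_pos hc]
    by_cases h1 : key = (p.1.1, p.1.2 + 1)
    · subst h1
      simp [if_neg hne]
    · by_cases h2 : key = p.1
      · subst h2
        simp [if_neg h1]
        ring
      · simp [if_neg h1, if_neg h2]
  · rw [if_neg hc]
    simp [hc]

theorem pvGetD_updB (d : PySem.Dict (Int × Int) Int) (p : (Int × Int) × Int) (key : Int × Int) :
    (pvUpdB d p).getD key 0 = d.getD key 0 + pvContrB key p := by
  have hne : ((p.1.1, p.1.2 + 1) : Int × Int) ≠ p.1 := by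
    intro h
    have := congrArg Prod.snd h
    simp at this
  have hne' : p.1 ≠ ((p.1.1, p.1.2 + 1) : Int × Int) := fun h => hne h.symm
  unfold pvUpdB pvContrB
  by_cases hm : PySem.Int.floordiv p.2 2 ≠ 0
  · by_cases hq : PySem.Int.mod p.2 2 ≠ 0
    · simp only [if_pos hm, if_pos hq, PySem.Dict.getD_insert, if_neg hne']
      by_cases h1 : key = (p.1.1, p.1.2 + 1)
      · subst h1
        simp [if_neg hne]
      · by_cases h2 : key = p.1
        · subst h2
          simp [if_neg h1]
        · simp [if_neg h1, if_neg h2]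
    · have hq0 : PySem.Int.mod p.2 2 = 0 := not_ne_iff.mp hq
      simp only [if_pos hm, hq0, PySem.Dict.getD_insert]
      by_cases h1 : key = (p.1.1, p.1.2 + 1)
      · subst h1
        simp
      · simp [PySem.Dict.getD_insert, if_neg h1]
  · have hm0 : PySem.Int.floordiv p.2 2 = 0 := not_ne_iff.mp hm
    by_cases hq : PySem.Int.mod p.2 2 ≠ 0
    · simp only [hm0, if_pos hq, PySem.Dict.getD_insert]
      by_cases h2 : key = p.1
      · subst h2
        simp
      · simp [if_neg h2]
    · have hq0 : PySem.Int.mod p.2 2 = 0 := not_ne_iff.mp hq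
      have hm0' : p.2 / 2 = 0 := by
        rw [← PySem.Int.floordiv_eq_ediv_of_pos (by norm_num : (0:Int) < 2)]
        exact hm0
      have hq0' : p.2 % 2 = 0 := by
        rw [← PySem.Int.mod_eq_emod_of_pos (by norm_num : (0:Int) < 2)]
        exact hq0
      simp [hm0', hq0']

theorem pvContrDiff (key : Int × Int) (p : (Int × Int) × Int) (hv : 0 < p.2) :
    pvContrB key p = pvContrA key p + (if key = p.1 then p.2 else 0) := by
  have hne : p.1 ≠ ((p.1.1, p.1.2 + 1) : Int × Int) := by
    intro h
    have := congrArg Prod.snd h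
    simp at this
  have hd2 : PySem.Int.floordiv p.2 2 = p.2 / 2 := PySem.Int.floordiv_eq_ediv_of_pos (by norm_num)
  have hm2 : PySem.Int.mod p.2 2 = p.2 % 2 := PySem.Int.mod_eq_emod_of_pos (by norm_num)
  unfold pvContrB pvContrA pvMerges
  by_cases h1 : key = (p.1.1, p.1.2 + 1)
  · have h2 : key ≠ p.1 := fun h => hne (h.symm.trans h1)
    rw [if_pos h1, if_neg h2, if_neg h2, if_pos h1, if_neg h2]
    by_cases hc : 1 < p.2
    · rw [if_pos hc]; ring
    · rw [if_neg hc]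
      have : p.2 = 1 := by omega
      rw [hd2, this]
      norm_num
  · by_cases h2 : key = p.1
    · rw [if_pos h2, if_neg h1, if_neg h1, if_pos h2, if_pos h2]
      by_cases hc : 1 < p.2
      · rw [if_pos hc, hd2, hm2]; omega
      · rw [if_neg hc]
        have : p.2 = 1 := by omega
        rw [hm2, this]
        norm_num
    · rw [if_neg h1, if_neg h2, if_neg h2, if_neg h1, if_neg h2]
      ring

theorem pvMergesNonneg {p : (Int × Int) × Int} (h : 0 ≤ p.2) : 0 ≤ pvMerges p := by
  unfold pvMerges
  split
  · rw [PySem.Int.floordiv_eq_ediv_of_pos (by norm_num : (0:Int) < 2)]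
    omega
  · exact le_refl 0

-- A's pass when the whole pass fits in the remaining moves
theorem pvPass_full (L : List ((Int × Int) × Int)) :
    ∀ (d : PySem.Dict (Int × Int) Int) (rem : Int) (b : Bool),
      (∀ p ∈ L, 0 ≤ p.2) → (L.map pvMerges).sum < rem →
      pvPass L d rem b = (L.foldl pvUpdA d, rem - (L.map pvMerges).sum,
        b || L.any (fun p => decide (1 < p.2))) := by
  induction L with
  | nil => intro d rem b _ _; simp [pvPass]
  | cons q rest ih =>
      obtain ⟨⟨t, l⟩, c⟩ := q
      intro d rem b hpos hlt
      have hm0 : 0 ≤ pvMerges ((t, l), c) := pvMergesNonneg (hpos _ List.mem_cons_self)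
      have hrest0 : 0 ≤ (rest.map pvMerges).sum := by
        refine List.sum_nonneg (fun x hx => ?_)
        obtain ⟨p, hp, rfl⟩ := List.mem_map.mp hx
        exact pvMergesNonneg (hpos p (List.mem_cons_of_mem _ hp))
      rw [List.map_cons, List.sum_cons] at hlt
      by_cases hc : 1 < c
      · have hmer : pvMerges ((t, l), c) = PySem.Int.floordiv c 2 := by simp [pvMerges, hc]
        rw [hmer] at hlt hm0
        have hnb : ¬ (rem - PySem.Int.floordiv c 2 ≤ 0) := by omega
        simp only [pvPass, if_pos hc, if_neg hnb]
        rw [ih _ _ _ (fun p hp => hpos p (List.mem_cons_of_mem _ hp)) (by omega)]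
        have hupd : pvUpdA d ((t, l), c) =
            (d.modify (t, l) 0 (fun v => v - PySem.Int.floordiv c 2 * 2)).modify
              (t, l + 1) 0 (fun v => v + PySem.Int.floordiv c 2) := by
          simp [pvUpdA, hc]
        rw [List.foldl_cons, hupd, List.map_cons, List.sum_cons, hmer]
        refine Prod.ext rfl (Prod.ext ?_ ?_) <;> simp [hc]
        omega
      · have hmer : pvMerges ((t, l), c) = 0 := by simp [pvMerges, hc]
        simp only [pvPass, if_neg hc]
        rw [ih _ _ _ (fun p hp => hpos p (List.mem_cons_of_mem _ hp)) (by omega)]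
        have hupd : pvUpdA d ((t, l), c) = d := by simp [pvUpdA, hc]
        rw [List.foldl_cons, hupd, List.map_cons, List.sum_cons, hmer]
        refine Prod.ext rfl (Prod.ext ?_ ?_) <;> simp [hc]

theorem pvFoldlUpdA_id (L : List ((Int × Int) × Int)) (d : PySem.Dict (Int × Int) Int)
    (h : ∀ p ∈ L, ¬ 1 < p.2) : L.foldl pvUpdA d = d := by
  induction L with
  | nil => simp
  | cons q rest ih =>
      rw [List.foldl_cons]
      have : pvUpdA d q = d := by simp [pvUpdA, h q List.mem_cons_self]
      rw [this]
      exact ih (fun p hp => h p (List.mem_cons_of_mem _ hp))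

-- skipping non-merging snapshot entries changes nothing in A's pass
theorem pvPass_filter (L : List ((Int × Int) × Int)) :
    ∀ (d : PySem.Dict (Int × Int) Int) (rem : Int) (b : Bool),
      pvPass L d rem b = pvPass (L.filter (fun p => decide (1 < p.2))) d rem b := by
  induction L with
  | nil => intro d rem b; rfl
  | cons q rest ih =>
      obtain ⟨⟨t, l⟩, c⟩ := q
      intro d rem b
      by_cases hc : 1 < c
      · rw [List.filter_cons_of_pos (by simpa using hc)]
        simp only [pvPass, if_pos hc]
        split_ifs with h
        · rfl
        · exact ih _ _ _
      · rw [List.filter_cons_of_neg (by simpa using hc)]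
        simp only [pvPass, if_neg hc]
        exact ih _ _ _

-- and in B's final round
theorem pvPassPart_filter (L : List ((Int × Int) × Int)) :
    ∀ (e : PySem.Dict (Int × Int) Int) (rem : Int),
      pvPassPart L e rem = pvPassPart (L.filter (fun p => PySem.Int.floordiv p.2 2 ≠ 0)) e rem := by
  induction L with
  | nil => intro e rem; rfl
  | cons q rest ih =>
      obtain ⟨⟨t, l⟩, c⟩ := q
      intro e rem
      by_cases hm : PySem.Int.floordiv c 2 ≠ 0
      · rw [List.filter_cons_of_pos (by simpa using hm)]
        simp only [pvPassPart, if_pos hm]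
        split_ifs with h
        · rfl
        · exact ih _ _
      · rw [List.filter_cons_of_neg (by simpa using hm)]
        simp only [pvPassPart, if_neg hm]
        exact ih _ _

theorem pvLoop_nonpos (fuel : Nat) (d : PySem.Dict (Int × Int) Int) (rem : Int)
    (h : rem ≤ 0) : pvLoop fuel d rem = d := by
  cases fuel with
  | zero => rfl
  | succ f => simp [pvLoop, show ¬ (0:Int) < rem by omega]

-- the final, move-limited round: A's in-place pass and B's loop agree step by step
theorem pvPartialCore (L : List ((Int × Int) × Int)) :
    ∀ (d e : PySem.Dict (Int × Int) Int) (rem : Int) (b : Bool),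
      d.keys.Nodup → e.keys.Nodup → (∀ key, d.getD key 0 = e.getD key 0) →
      (∀ p ∈ L, 1 < p.2 ∧ d.getD p.1 0 = p.2) →
      L.Pairwise (fun a b => pvKey b < pvKey a) →
      0 < rem → rem ≤ (L.map (fun p => PySem.Int.floordiv p.2 2)).sum →
      (pvPass L d rem b).2.2 = true ∧ (pvPass L d rem b).2.1 ≤ 0 ∧
        pvEqv (pvPass L d rem b).1 (pvPassPart L e rem) := by
  induction L with
  | nil =>
      intro d e rem b _ _ _ _ _ hrem htot
      simp only [List.map_nil, List.sum_nil] at htot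
      omega
  | cons q rest ih =>
      obtain ⟨⟨t, l⟩, c⟩ := q
      intro d e rem b hd he hg hL hdesc hrem htot
      obtain ⟨hc, hgc⟩ := hL _ List.mem_cons_self
      have hd2 : PySem.Int.floordiv c 2 = c / 2 :=
        PySem.Int.floordiv_eq_ediv_of_pos (by norm_num)
      have hmpos : 0 < PySem.Int.floordiv c 2 := by rw [hd2]; omega
      have hm : PySem.Int.floordiv c 2 ≠ 0 := by omega
      have hne : ((t, l) : Int × Int) ≠ (t, l + 1) := by
        intro hx
        have := congrArg Prod.snd hx
        simp at this
      have hne' : ((t, l + 1) : Int × Int) ≠ (t, l) := fun hx => hne hx.symm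
      -- the two updated states agree on every lookup
      have hg' : ∀ key,
          ((d.modify (t, l) 0 (fun v => v - PySem.Int.floordiv c 2 * 2)).modify
            (t, l + 1) 0 (fun v => v + PySem.Int.floordiv c 2)).getD key 0 =
          ((e.insert (t, l) (c - 2 * PySem.Int.floordiv c 2)).insert (t, l + 1)
            ((e.insert (t, l) (c - 2 * PySem.Int.floordiv c 2)).getD (t, l + 1) 0 +
              PySem.Int.floordiv c 2)).getD key 0 := by
        intro key
        simp only [PySem.Dict.getD_modify, PySem.Dict.getD_insert, if_neg hne']
        by_cases k1 : key = (t, l + 1)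
        · subst k1
          simp [hg]
        · by_cases k2 : key = (t, l)
          · subst k2
            simp only [if_neg k1]
            simp [hgc]
            omega
          · simp only [if_neg k1, if_neg k2]
            exact hg key
      have hd' : ((d.modify (t, l) 0 (fun v => v - PySem.Int.floordiv c 2 * 2)).modify
          (t, l + 1) 0 (fun v => v + PySem.Int.floordiv c 2)).keys.Nodup :=
        pvNodupModify _ _ _ _ (pvNodupModify _ _ _ _ hd)
      have he' : ((e.insert (t, l) (c - 2 * PySem.Int.floordiv c 2)).insert (t, l + 1)
          ((e.insert (t, l) (c - 2 * PySem.Int.floordiv c 2)).getD (t, l + 1) 0 +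
            PySem.Int.floordiv c 2)).keys.Nodup :=
        PySem.Dict.nodup_keys_insert _ _ _ (PySem.Dict.nodup_keys_insert _ _ _ he)
      simp only [List.map_cons, List.sum_cons] at htot
      simp only [pvPass, pvPassPart, if_pos hc, if_pos hm]
      by_cases hstop : rem - PySem.Int.floordiv c 2 ≤ 0
      · rw [if_pos hstop, if_pos hstop]
        exact ⟨rfl, hstop, hd', he', hg'⟩
      · rw [if_neg hstop, if_neg hstop]
        refine ih _ _ _ _ hd' he' hg' ?_ ((List.pairwise_cons.mp hdesc).2) (by omega) (by omega)
        intro p hp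
        have hklt : pvKey p < pvKey ((t, l), c) := (List.pairwise_cons.mp hdesc).1 p hp
        simp only [pvKey] at hklt
        have hlt2 : (toLex ((t, l) : Int × Int) : Int ×ₗ Int) < toLex ((t, l + 1) : Int × Int) :=
          Prod.Lex.toLex_lt_toLex.mpr (Or.inr ⟨rfl, by omega⟩)
        have hp1 : p.1 ≠ ((t, l) : Int × Int) := by
          intro hx
          rw [hx] at hklt
          exact absurd hklt (lt_irrefl _)
        have hp2 : p.1 ≠ ((t, l + 1) : Int × Int) := by
          intro hx
          have h3 : (toLex p.1 : Int ×ₗ Int) < toLex ((t, l + 1) : Int × Int) :=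
            lt_trans hklt hlt2
          rw [hx] at h3
          exact absurd h3 (lt_irrefl _)
        refine ⟨(hL p (List.mem_cons_of_mem _ hp)).1, ?_⟩
        simp only [PySem.Dict.getD_modify, if_neg hp2, if_neg hp1]
        exact (hL p (List.mem_cons_of_mem _ hp)).2

theorem pvNodupFoldA (L : List ((Int × Int) × Int)) :
    ∀ d : PySem.Dict (Int × Int) Int, d.keys.Nodup → (L.foldl pvUpdA d).keys.Nodup := by
  induction L with
  | nil => intro d h; simpa using h
  | cons q rest ih =>
      intro d h
      rw [List.foldl_cons]
      refine ih _ ?_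
      unfold pvUpdA
      split_ifs with hc
      · exact pvNodupModify _ _ _ _ (pvNodupModify _ _ _ _ h)
      · exact h

theorem pvInsertPos (x : PySem.Dict (Int × Int) Int) (kk : Int × Int) (vv : Int)
    (h1 : x.keys.Nodup) (h2 : ∀ p ∈ x.items, 0 < p.2) (hv : 0 < vv) :
    (x.insert kk vv).keys.Nodup ∧ ∀ p ∈ (x.insert kk vv).items, 0 < p.2 := by
  refine ⟨PySem.Dict.nodup_keys_insert _ _ _ h1, ?_⟩
  intro p hp
  rcases (PySem.Dict.mem_items_insert _ _ _ _).mp hp with rfl | ⟨hp', _⟩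
  · exact hv
  · exact h2 p hp'

theorem pvPosFoldB (L : List ((Int × Int) × Int)) :
    ∀ new : PySem.Dict (Int × Int) Int, (∀ p ∈ L, 0 < p.2) → new.keys.Nodup →
      (∀ p ∈ new.items, 0 < p.2) →
      (L.foldl pvUpdB new).keys.Nodup ∧ ∀ p ∈ (L.foldl pvUpdB new).items, 0 < p.2 := by
  induction L with
  | nil => intro new _ h1 h2; exact ⟨h1, h2⟩
  | cons q rest ih =>
      intro new hL h1 h2
      rw [List.foldl_cons]
      have hq : 0 < q.2 := hL q List.mem_cons_self
      have hd2 : PySem.Int.floordiv q.2 2 = q.2 / 2 :=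
        PySem.Int.floordiv_eq_ediv_of_pos (by norm_num)
      have hm2 : PySem.Int.mod q.2 2 = q.2 % 2 :=
        PySem.Int.mod_eq_emod_of_pos (by norm_num)
      have step : (pvUpdB new q).keys.Nodup ∧ ∀ p ∈ (pvUpdB new q).items, 0 < p.2 := by
        unfold pvUpdB
        by_cases hm : PySem.Int.floordiv q.2 2 ≠ 0
        · have hmp : 0 < PySem.Int.floordiv q.2 2 := by rw [hd2] at hm ⊢; omega
          have hg1 : 0 ≤ new.getD (q.1.1, q.1.2 + 1) 0 := pvGetD_nonneg h1 h2 _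
          have hstep1 := pvInsertPos new (q.1.1, q.1.2 + 1)
            (new.getD (q.1.1, q.1.2 + 1) 0 + PySem.Int.floordiv q.2 2) h1 h2 (by omega)
          by_cases hqm : PySem.Int.mod q.2 2 ≠ 0
          · have hqp : 0 < PySem.Int.mod q.2 2 := by rw [hm2] at hqm ⊢; omega
            simp only [if_pos hm, if_pos hqm]
            have hg2 : 0 ≤ (new.insert (q.1.1, q.1.2 + 1)
                (new.getD (q.1.1, q.1.2 + 1) 0 + PySem.Int.floordiv q.2 2)).getD q.1 0 :=
              pvGetD_nonneg hstep1.1 hstep1.2 _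
            exact pvInsertPos _ q.1 _ hstep1.1 hstep1.2 (by omega)
          · simp only [if_pos hm, if_neg hqm]
            exact hstep1
        · by_cases hqm : PySem.Int.mod q.2 2 ≠ 0
          · have hqp : 0 < PySem.Int.mod q.2 2 := by rw [hm2] at hqm ⊢; omega
            simp only [if_neg hm, if_pos hqm]
            have hg2 : 0 ≤ new.getD q.1 0 := pvGetD_nonneg h1 h2 _
            exact pvInsertPos _ q.1 _ h1 h2 (by omega)
          · simp only [if_neg hm, if_neg hqm]
            exact ⟨h1, h2⟩
      exact ih _ (fun p hp => hL p (List.mem_cons_of_mem _ hp)) step.1 step.2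

-- totals agree: A's snapshot merges sum = B's sum(c // 2 for c in levels.values())
theorem pvTotalEq {d e : PySem.Dict (Int × Int) Int} (hinv : pvInv d e) :
    ((PySem.List.sorted d.items pvKey true).map pvMerges).sum =
      (e.values.map (fun c => PySem.Int.floordiv c 2)).sum := by
  obtain ⟨⟨hd, he, hg⟩, hdpos, hepos⟩ := hinv
  have h1 : ((PySem.List.sorted d.items pvKey true).map pvMerges).sum =
      (d.items.map pvMerges).sum :=
    ((PySem.List.sorted_perm d.items pvKey true).map pvMerges).sum_eq
  have h2 : (d.items.map pvMerges).sum = (e.items.map pvMerges).sum := by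
    have := pvSumItemsCongr hd he hg (fun kk v => pvMerges (kk, v))
      (fun kk => by simp [pvMerges])
    simpa using this
  have h3 : (e.items.map pvMerges).sum =
      (e.items.map (fun p => PySem.Int.floordiv p.2 2)).sum := by
    refine congrArg List.sum (List.map_congr_left (fun p hp => ?_))
    have hp2 : 0 < p.2 := hepos p hp
    unfold pvMerges
    split_ifs with hc
    · rfl
    · have : p.2 = 1 := by omega
      rw [this]
      decide
  rw [h1, h2, h3]
  simp only [PySem.Dict.values, List.map_map]
  rfl

-- one full round: A's pass result and B's rebuilt dict are the same counter
theorem pvFullStep {d e : PySem.Dict (Int × Int) Int} (hinv : pvInv d e) :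
    pvInv ((PySem.List.sorted d.items pvKey true).foldl pvUpdA d) (pvFullPass e.items) := by
  obtain ⟨⟨hd, he, hg⟩, hdpos, hepos⟩ := hinv
  have hemptyPos : ∀ p ∈ (PySem.Dict.empty : PySem.Dict (Int × Int) Int).items, 0 < p.2 := by
    intro p hp
    simp [PySem.Dict.empty] at hp
  have hB := pvPosFoldB e.items PySem.Dict.empty hepos PySem.Dict.nodup_keys_empty hemptyPos
  have hA : ((PySem.List.sorted d.items pvKey true).foldl pvUpdA d).keys.Nodup :=
    pvNodupFoldA _ d hd
  have hgd : ∀ key, ((PySem.List.sorted d.items pvKey true).foldl pvUpdA d).getD key 0 =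
      (pvFullPass e.items).getD key 0 := by
    intro key
    rw [pvGetDFoldl pvUpdA (pvContrA key) key (fun d' p => pvGetD_updA d' p key)]
    unfold pvFullPass
    rw [pvGetDFoldl pvUpdB (pvContrB key) key (fun d' p => pvGetD_updB d' p key)]
    rw [PySem.Dict.getD_empty]
    have hsA : ((PySem.List.sorted d.items pvKey true).map (pvContrA key)).sum =
        (d.items.map (pvContrA key)).sum :=
      ((PySem.List.sorted_perm d.items pvKey true).map (pvContrA key)).sum_eq
    have hsAe : (d.items.map (pvContrA key)).sum = (e.items.map (pvContrA key)).sum := by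
      have := pvSumItemsCongr hd he hg (fun kk v => pvContrA key (kk, v))
        (fun kk => by simp [pvContrA, pvMerges])
      simpa using this
    have hsplit : (e.items.map (pvContrB key)).sum =
        (e.items.map (pvContrA key)).sum +
          (e.items.map (fun p => if key = p.1 then p.2 else 0)).sum := by
      have hcg : e.items.map (pvContrB key) =
          e.items.map (fun p => pvContrA key p + (if key = p.1 then p.2 else 0)) :=
        List.map_congr_left (fun p hp => pvContrDiff key p (hepos p hp))
      rw [hcg]
      rw [show (fun p : (Int × Int) × Int => pvContrA key p + (if key = p.1 then p.2 else 0)) =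
        (fun p : (Int × Int) × Int => pvContrA key p + (fun q : (Int × Int) × Int =>
          if key = q.1 then q.2 else 0) p) from rfl]
      exact PySem.List.sum_map_add_int e.items (pvContrA key) _
    have hlast : (e.items.map (fun p => if key = p.1 then p.2 else 0)).sum = e.getD key 0 := by
      rw [PySem.Dict.items_eq_map_keys e he 0, List.map_map]
      have : ((fun p : (Int × Int) × Int => if key = p.1 then p.2 else 0) ∘
          fun kk => (kk, e.getD kk 0)) = fun kk => if key = kk then e.getD kk 0 else 0 := rfl
      rw [this, pvSumIte e.keys he key (fun kk => e.getD kk 0)]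
      by_cases hk : key ∈ e.keys
      · simp [hk]
      · have hc : e.contains key = false := by
          cases hcc : e.contains key with
          | false => rfl
          | true => exact absurd ((PySem.Dict.contains_iff_mem_keys e key).mp hcc) hk
        simp [hk, PySem.Dict.getD_of_not_contains e 0 hc]
    rw [hsA, hsAe, hsplit, hlast, ← hg key]
    ring
  refine ⟨⟨hA, hB.1, hgd⟩, ?_, hB.2⟩
  intro p hp
  have hpv := PySem.Dict.getD_of_mem_items _ hp hA 0
  rw [← hpv, hgd p.1]
  exact pvGetD_nonneg hB.1 hB.2 p.1

theorem pvFilterPairwise (dd : PySem.Dict (Int × Int) Int) (hdd : dd.keys.Nodup) :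
    ((PySem.List.sorted dd.items pvKey true).filter (fun p => decide (1 < p.2))).Pairwise
      (fun a b => pvKey b < pvKey a) := by
  have hle := PySem.List.sorted_pairwise_rev dd.items pvKey
  have hnodf : ((PySem.List.sorted dd.items pvKey true).map Prod.fst).Nodup := by
    have hbase : (dd.items.map Prod.fst).Nodup := by simpa [PySem.Dict.keys] using hdd
    exact (((PySem.List.sorted_perm dd.items pvKey true).map Prod.fst).nodup_iff).mpr hbase
  have hne : (PySem.List.sorted dd.items pvKey true).Pairwise (fun a b => a.1 ≠ b.1) := by
    simpa using List.pairwise_map.mp hnodf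
  refine ((hle.and hne).sublist List.filter_sublist).imp ?_
  intro a b hab
  refine lt_of_le_of_ne hab.1 (fun heq => hab.2 ?_)
  exact (toLex.injective (heq : (toLex b.1 : Int ×ₗ Int) = toLex a.1)).symm

theorem pvFilterNodup (dd : PySem.Dict (Int × Int) Int) (hdd : dd.keys.Nodup) :
    ((PySem.List.sorted dd.items pvKey true).filter (fun p => decide (1 < p.2))).Nodup := by
  have hbase : (dd.items.map Prod.fst).Nodup := by simpa [PySem.Dict.keys] using hdd
  have hnodf : ((PySem.List.sorted dd.items pvKey true).map Prod.fst).Nodup :=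
    (((PySem.List.sorted_perm dd.items pvKey true).map Prod.fst).nodup_iff).mpr hbase
  exact (hnodf.sublist (List.filter_sublist.map Prod.fst)).of_map

theorem pvFilterMem (dd : PySem.Dict (Int × Int) Int) (p : (Int × Int) × Int) :
    p ∈ (PySem.List.sorted dd.items pvKey true).filter (fun p => decide (1 < p.2)) ↔
      p ∈ dd.items ∧ 1 < p.2 := by
  rw [List.mem_filter, (PySem.List.sorted_perm dd.items pvKey true).mem_iff]
  simp

theorem pvLoopCore (fuel : Nat) :
    ∀ (d e : PySem.Dict (Int × Int) Int) (rem : Int), pvInv d e →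
      pvEqv (pvLoop fuel d rem) (pvLoopB fuel e rem) := by
  induction fuel with
  | zero => intro d e rem hinv; exact hinv.1
  | succ f ih =>
      intro d e rem hinv
      obtain ⟨⟨hd, he, hg⟩, hdpos, hepos⟩ := hinv
      by_cases hrem : 0 < rem
      · simp only [pvLoop, pvLoopB, if_pos hrem]
        have htot := pvTotalEq ⟨⟨hd, he, hg⟩, hdpos, hepos⟩
        have hposS : ∀ p ∈ PySem.List.sorted d.items pvKey true, 0 ≤ p.2 := fun p hp =>
          hdpos p ((PySem.List.sorted_perm d.items pvKey true).subset hp)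
        by_cases h0 : (e.values.map (fun c => PySem.Int.floordiv c 2)).sum = 0
        · rw [if_pos h0]
          have hlt : ((PySem.List.sorted d.items pvKey true).map pvMerges).sum < rem := by
            rw [htot, h0]; exact hrem
          rw [pvPass_full _ d rem false hposS hlt]
          have hnone : ∀ p ∈ PySem.List.sorted d.items pvKey true, ¬ 1 < p.2 := by
            intro p hp hgt
            have hz := pvSumZero _ (fun x hx => by
                obtain ⟨q, hq, rfl⟩ := List.mem_map.mp hx
                exact pvMergesNonneg (hposS q hq)) (htot.trans h0) (pvMerges p)
              (List.mem_map_of_mem hp)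
            have hpos : 0 < pvMerges p := by
              simp only [pvMerges, if_pos hgt]
              rw [PySem.Int.floordiv_eq_ediv_of_pos (by norm_num : (0:Int) < 2)]
              omega
            omega
          have hany : (PySem.List.sorted d.items pvKey true).any
              (fun p => decide (1 < p.2)) = false := by
            rw [List.any_eq_false]
            intro p hp
            simpa using hnone p hp
          rw [pvFoldlUpdA_id _ d hnone]
          simp only [hany, Bool.or_false]
          simp only [Bool.false_eq_true, if_false]
          exact ⟨hd, he, hg⟩
        · by_cases hlt : (e.values.map (fun c => PySem.Int.floordiv c 2)).sum < rem
          · rw [if_neg h0, if_pos hlt]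
            have hlt' : ((PySem.List.sorted d.items pvKey true).map pvMerges).sum < rem := by
              rw [htot]; exact hlt
            rw [pvPass_full _ d rem false hposS hlt']
            have hanyT : (PySem.List.sorted d.items pvKey true).any
                (fun p => decide (1 < p.2)) = true := by
              by_contra hfa
              rw [Bool.not_eq_true] at hfa
              have hfa' := List.any_eq_false.mp hfa
              apply h0
              rw [← htot]
              refine List.sum_eq_zero ?_
              intro x hx
              obtain ⟨q, hq, rfl⟩ := List.mem_map.mp hx
              have hq2 : ¬ 1 < q.2 := by simpa using hfa' q hq
              simp [pvMerges, hq2]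
            simp only [hanyT, Bool.or_true]
            simp only [if_true]
            rw [htot]
            exact ih _ _ _ (pvFullStep ⟨⟨hd, he, hg⟩, hdpos, hepos⟩)
          · rw [if_neg h0, if_neg hlt]
            have hge : rem ≤ (e.values.map (fun c => PySem.Int.floordiv c 2)).sum := by omega
            have hfiltE : (PySem.List.sorted e.items pvKey true).filter
                  (fun p => PySem.Int.floordiv p.2 2 ≠ 0) =
                (PySem.List.sorted e.items pvKey true).filter (fun p => decide (1 < p.2)) := by
              refine List.filter_congr (fun x hx => ?_)
              have hx2 : 0 < x.2 := hepos x ((PySem.List.sorted_perm e.items pvKey true).subset hx)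
              simp only [decide_eq_decide]
              rw [PySem.Int.floordiv_eq_ediv_of_pos (by norm_num : (0:Int) < 2)]
              omega
            have hperm : ((PySem.List.sorted d.items pvKey true).filter
                  (fun p => decide (1 < p.2))).Perm
                ((PySem.List.sorted e.items pvKey true).filter (fun p => decide (1 < p.2))) := by
              refine (List.perm_ext_iff_of_nodup (pvFilterNodup d hd) (pvFilterNodup e he)).mpr
                (fun x => ?_)
              rw [pvFilterMem, pvFilterMem]
              constructor
              · rintro ⟨hx, h2⟩
                exact ⟨pvMemItemsTrans hd he hg hx (by omega), h2⟩
              · rintro ⟨hx, h2⟩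
                exact ⟨pvMemItemsTrans he hd (fun key => (hg key).symm) hx (by omega), h2⟩
            have heqL : (PySem.List.sorted d.items pvKey true).filter
                  (fun p => decide (1 < p.2)) =
                (PySem.List.sorted e.items pvKey true).filter (fun p => decide (1 < p.2)) := by
              refine List.Perm.eq_of_pairwise ?_ (pvFilterPairwise d hd) (pvFilterPairwise e he)
                hperm
              intro a b _ _ h1 h2
              exact absurd h1 (lt_asymm h2)
            have hsum : rem ≤ (((PySem.List.sorted d.items pvKey true).filter
                  (fun p => decide (1 < p.2))).map (fun p => PySem.Int.floordiv p.2 2)).sum := by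
              have h1 : (((PySem.List.sorted d.items pvKey true).filter
                    (fun p => decide (1 < p.2))).map (fun p => PySem.Int.floordiv p.2 2)).sum =
                  (((PySem.List.sorted d.items pvKey true).filter
                    (fun p => decide (1 < p.2))).map pvMerges).sum := by
                refine congrArg List.sum (List.map_congr_left (fun p hp => ?_))
                have := (List.mem_filter.mp hp).2
                simp only [decide_eq_true_eq] at this
                simp [pvMerges, this]
              have h2 : ((PySem.List.sorted d.items pvKey true).map pvMerges).sum =
                  (((PySem.List.sorted d.items pvKey true).filter
                    (fun p => decide (1 < p.2))).map pvMerges).sum := by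
                refine pvSumDropZero _ _ _ (fun x _ hxf => ?_)
                simp only [decide_eq_false_iff_not] at hxf
                simp [pvMerges, hxf]
              rw [h1, ← h2, htot]
              exact hge
            have hLmem : ∀ p ∈ (PySem.List.sorted d.items pvKey true).filter
                (fun p => decide (1 < p.2)), 1 < p.2 ∧ d.getD p.1 0 = p.2 := by
              intro p hp
              obtain ⟨hpd, hp2⟩ := (pvFilterMem d p).mp hp
              rcases p with ⟨kk, vv⟩
              exact ⟨hp2, PySem.Dict.getD_of_mem_items d hpd hd 0⟩
            obtain ⟨hflag, hremle, heqv⟩ := pvPartialCore _ d e rem false hd he hg hLmem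
              (pvFilterPairwise d hd) hrem hsum
            rw [pvPass_filter (PySem.List.sorted d.items pvKey true) d rem false,
              pvPassPart_filter (PySem.List.sorted e.items pvKey true) e rem, hfiltE, ← heqL,
              hflag]
            simp only [if_true]
            rw [pvLoop_nonpos f _ _ hremle]
            exact heqv
      · simp only [pvLoop, pvLoopB, if_neg hrem]
        exact ⟨hd, he, hg⟩

theorem pvInitInv (p s : List Int) (h : p.Perm s) :
    pvInv (PySem.Dict.counter (p.map (fun t => (t, (1 : Int)))))
      (s.foldl (fun d t => d.insert (t, (1 : Int)) (d.getD (t, 1) 0 + 1)) PySem.Dict.empty) := by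
  set B := s.foldl (fun d t => d.insert (t, (1 : Int)) (d.getD (t, 1) 0 + 1))
      (PySem.Dict.empty : PySem.Dict (Int × Int) Int) with hBdef
  have hfold : ∀ key : Int × Int,
      B.getD key 0 = (((s.map (fun t => (t, (1 : Int)))).count key : Int)) := by
    intro key
    rw [hBdef, show (s.foldl (fun d t => d.insert (t, (1 : Int)) (d.getD (t, 1) 0 + 1))
        (PySem.Dict.empty : PySem.Dict (Int × Int) Int)) =
        ((s.map (fun t => (t, (1 : Int)))).foldl
          (fun d (x : Int × Int) => d.insert x (d.getD x 0 + 1)) PySem.Dict.empty) from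
      (List.foldl_map (f := fun t : Int => (t, (1 : Int)))
        (g := fun (d : PySem.Dict (Int × Int) Int) (x : Int × Int) => d.insert x (d.getD x 0 + 1))
        (l := s) (init := PySem.Dict.empty)).symm]
    rw [PySem.Dict.getD_foldl_insert_add_one]
    simp
  have hndB : B.keys.Nodup :=
    PySem.Dict.nodup_keys_foldl_insert_key s (fun t => (t, (1 : Int)))
      (fun (d : PySem.Dict (Int × Int) Int) t => d.getD (t, 1) 0 + 1) PySem.Dict.empty
      PySem.Dict.nodup_keys_empty
  have hkeysB : B.keys = PySem.Set.ofList (s.map (fun t => (t, (1 : Int)))) := by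
    rw [hBdef, PySem.Dict.keys_foldl_insert_key s (fun t => (t, (1 : Int)))
      (fun (d : PySem.Dict (Int × Int) Int) t => d.getD (t, 1) 0 + 1) PySem.Dict.empty]
    rfl
  refine ⟨⟨PySem.Dict.nodup_keys_counter _, hndB, ?_⟩, ?_, ?_⟩
  · intro key
    rw [PySem.Dict.getD_counter, hfold]
    exact_mod_cast congrArg Nat.cast ((h.map (fun t => (t, (1 : Int)))).count_eq key)
  · intro q hq
    rw [PySem.Dict.items_counter] at hq
    obtain ⟨kk, hk, rfl⟩ := List.mem_map.mp hq
    simp only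
    positivity
  · intro q hq
    have hq1 : q.1 ∈ B.keys := PySem.Dict.mem_keys_of_mem_items _ hq
    rw [hkeysB, PySem.Set.mem_ofList] at hq1
    have hq2 : q.2 = (((s.map (fun t => (t, (1 : Int)))).count q.1 : Int)) := by
      rcases q with ⟨kk, vv⟩
      rw [← hfold kk]
      exact (PySem.Dict.getD_of_mem_items _ hq hndB 0).symm
    rw [hq2]
    exact_mod_cast List.count_pos_iff.mpr hq1

theorem pvSim_eq (k : Int) {p s : List Int} (h : p.Perm s) : pvSim k p = pvSimB k s := by
  unfold pvSim pvSimB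
  obtain ⟨hd, he, hg⟩ := pvLoopCore (k.toNat + 1) _ _ k (pvInitInv p s h)
  exact pvSumItemsCongr hd he hg (fun kk v => kk.1 * kk.2 * v) (fun kk => by ring)

-- CPython's recursive specification of permutations(xs, r+1): pick an index, prepend
-- its element to each (r)-permutation of the list with that index removed.
theorem pvPermutations_succ (xs : List Int) (r : Nat) :
    PySem.List.permutations xs (r + 1) = (List.range xs.length).flatMap
      (fun i => match xs[i]? with
        | none => []
        | some a => (PySem.List.permutations (xs.eraseIdx i) r).map (a :: ·)) := by
  rw [PySem.List.permutations]
  refine congrArg (fun f => List.flatMap f (List.range xs.length)) (funext fun i => ?_)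
  cases xs[i]? <;> rfl

theorem pvMem_permutations_of_subperm {p xs : List Int}
    (h : p.Subperm xs) : p ∈ PySem.List.permutations xs p.length := by
  induction p generalizing xs with
  | nil => simp [PySem.List.permutations_zero]
  | cons a p' ih =>
      have ha : a ∈ xs := h.subset (List.mem_cons_self)
      have hil : List.idxOf a xs < xs.length := List.idxOf_lt_length_of_mem ha
      have hgi : xs[List.idxOf a xs] = a := List.getElem_idxOf hil
      have hperm : xs.Perm (xs[List.idxOf a xs] :: xs.eraseIdx (List.idxOf a xs)) :=
        (List.getElem_cons_eraseIdx_perm hil).symm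
      have h2 : (a :: p').Subperm (a :: xs.eraseIdx (List.idxOf a xs)) := by
        have := h.trans hperm.subperm
        rwa [hgi] at this
      have h3 : p'.Subperm (xs.eraseIdx (List.idxOf a xs)) := (List.subperm_cons a).mp h2
      show (a :: p') ∈ PySem.List.permutations xs (p'.length + 1)
      rw [pvPermutations_succ]
      apply List.mem_flatMap.mpr
      refine ⟨List.idxOf a xs, List.mem_range.mpr hil, ?_⟩
      rw [List.getElem?_eq_getElem hil, hgi]
      exact List.mem_map_of_mem (ih h3)

theorem pvSubperm_of_mem_permutations {xs p : List Int} {r : Nat}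
    (h : p ∈ PySem.List.permutations xs r) : p.Subperm xs := by
  obtain ⟨-, rest, hperm⟩ := PySem.List.exists_perm_of_mem_permutations r xs p h
  exact (List.sublist_append_left p rest).subperm.trans hperm.subperm

theorem pvFoldMax_le (f : List Int → Int) (L : List (List Int)) (a c : Int)
    (ha : a ≤ c) (h : ∀ x ∈ L, f x ≤ c) :
    L.foldl (fun b x => max b (f x)) a ≤ c := by
  induction L generalizing a with
  | nil => exact ha
  | cons y t ih =>
      exact ih _ (max_le ha (h y (List.mem_cons_self))) (fun x hx => h x (List.mem_cons_of_mem y hx))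

theorem pvFoldMax_congr (f g : List Int → Int) (L₁ L₂ : List (List Int))
    (h₁ : ∀ p ∈ L₁, ∃ c ∈ L₂, f p = g c) (h₂ : ∀ c ∈ L₂, ∃ p ∈ L₁, g c = f p) :
    L₁.foldl (fun b x => max b (f x)) 0 = L₂.foldl (fun b x => max b (g x)) 0 := by
  apply le_antisymm
  · refine pvFoldMax_le f L₁ 0 _ (PySem.List.le_foldl_max_int L₂ g 0).1 ?_
    intro x hx
    obtain ⟨c, hc, he⟩ := h₁ x hx
    exact he ▸ (PySem.List.le_foldl_max_int L₂ g 0).2 c hc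
  · refine pvFoldMax_le g L₂ 0 _ (PySem.List.le_foldl_max_int L₁ f 0).1 ?_
    intro x hx
    obtain ⟨c, hc, he⟩ := h₂ x hx
    exact he ▸ (PySem.List.le_foldl_max_int L₁ f 0).2 c hc

-- ===== VERDICT (by name: the statement is the Claim_ definition above) =====
theorem max_fishka_power_spec : Claim_equal_max_fishka_power := by
  intro n m k queue _ _
  unfold Spec_max_fishka_power max_fishka_power max_fishka_power_alt
  apply pvFoldMax_congr
  · intro p hp
    have hlen := PySem.List.length_of_mem_permutations hp
    obtain ⟨s, hsp, hsl⟩ := pvSubperm_of_mem_permutations hp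
    refine ⟨PySem.List.sorted s (fun x => x) false, ?_, ?_⟩
    · exact (PySem.Set.mem_ofList _ _).mpr (List.mem_map_of_mem
        ((PySem.List.mem_combinations_iff queue _ s).mpr ⟨hsl, by rw [hsp.length_eq, hlen]⟩))
    · exact pvSim_eq k (hsp.symm.trans (PySem.List.sorted_perm s (fun x => x) false).symm)
  · intro c hc
    obtain ⟨c₀, hc₀, rfl⟩ := List.mem_map.mp ((PySem.Set.mem_ofList _ _).mp hc)
    obtain ⟨hsl, hlen⟩ := (PySem.List.mem_combinations_iff queue _ c₀).mp hc₀
    refine ⟨c₀, hlen ▸ pvMem_permutations_of_subperm hsl.subperm, ?_⟩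
    exact (pvSim_eq k (PySem.List.sorted_perm c₀ (fun x => x) false).symm).symm
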